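-- pv_equiv track=rewrite | github.com/BrandonGower-Winter/PredEgyptABM | src/main_vis.py | reformat_snapshots_to_per_entity_dicts
-- ===== SOURCE A (Python) =====
-- def get_all_keys(item: dict) -> [str]:
--     return [key for key in item]
--
-- def reformat_snapshots_to_per_entity_dicts(snapshots: [[dict]], id_str: str = 'id', filter: [str] = None):
--     agent_data = {}
--
--     if filter is None:
--         filter = get_all_keys(snapshots[0][0])
--         filter.remove(id_str)
--
--     for i in range(len(snapshots)):
--
--         for agent in snapshots[i]:
--             a_id = agent[id_str]
--             if a_id in agent_data:
--                 for prop in filter: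
--                     agent_data[a_id][prop].append(agent[prop])
--                 agent_data[a_id]['iterations'].append(i)
--             else:
--                 agent_data[a_id] = {}
--                 for prop in filter:
--                     agent_data[a_id][prop] = [agent[prop]]
--                 agent_data[a_id]['iterations'] = [i]
--
--     return agent_data
-- ===== SOURCE B (Python) =====
-- def reformat_snapshots_to_per_entity_dicts(snapshots, id_str='id', filter=None):
--     if filter is None:
--         filter = [key for key in snapshots[0][0] if key != id_str]
--     index = {}
--     for i, snapshot in enumerate(snapshots):
--         for agent in snapshot:
--             index.setdefault(agent[id_str], []).append((i, agent))
--     result = {}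
--     for a_id, appearances in index.items():
--         entity = {prop: [agent[prop] for _, agent in appearances] for prop in filter}
--         entity['iterations'] = [i for i, _ in appearances]
--         result[a_id] = entity
--     return result
-- ===== Notes on version B (the rewrite author's own statement) =====
-- stated objective: alternative
-- what changed: Replaces A's single interleaved pass (init-vs-append branch per agent, mutating nested dicts) by a two-pass decomposition: first build an id -> ordered list of (iteration, agent) appearances index, then shape each entity's property dict from its appearance list.
import Mathlib
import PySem

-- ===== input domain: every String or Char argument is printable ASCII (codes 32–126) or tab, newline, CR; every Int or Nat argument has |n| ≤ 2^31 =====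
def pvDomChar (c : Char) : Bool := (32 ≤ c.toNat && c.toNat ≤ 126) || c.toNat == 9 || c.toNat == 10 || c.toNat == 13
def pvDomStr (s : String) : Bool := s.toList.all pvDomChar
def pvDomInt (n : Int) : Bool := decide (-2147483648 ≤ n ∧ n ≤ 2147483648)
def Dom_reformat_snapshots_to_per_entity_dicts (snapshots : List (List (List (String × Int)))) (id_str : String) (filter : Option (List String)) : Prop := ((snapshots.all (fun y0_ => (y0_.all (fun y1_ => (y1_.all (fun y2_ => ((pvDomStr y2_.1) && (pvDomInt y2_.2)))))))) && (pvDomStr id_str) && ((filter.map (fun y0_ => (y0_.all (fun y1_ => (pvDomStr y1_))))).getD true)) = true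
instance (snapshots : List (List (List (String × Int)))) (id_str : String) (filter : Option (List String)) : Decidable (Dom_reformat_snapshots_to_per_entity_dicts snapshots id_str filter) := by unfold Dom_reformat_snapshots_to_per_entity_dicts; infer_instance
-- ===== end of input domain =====

-- B regroups the snapshots in two passes (build an id → appearances index, then shape each entity dict from it)
-- instead of A's single interleaved pass with an init-vs-append branch; equivalence is about the RETURN value (neither mutates its arguments).

-- agent[k]: first-match lookup in the association list (Python dict lookup); the default 0 is never
-- reached under Pre_ (Pre_ guarantees the key is present wherever either program looks one up).
def pvAgentGet (ag : List (String × Int)) (k : String) : Int :=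
  ((ag.find? (fun p => p.1 == k)).map Prod.snd).getD 0

-- A's effective filter: the given one, or the first agent's keys with the first occurrence of id_str removed.
def pvEff (snapshots : List (List (List (String × Int)))) (id_str : String) (filter : Option (List String)) : List String :=
  match filter with
  | some f => f
  | none => (((snapshots.headD []).headD []).map Prod.fst).erase id_str

-- ===== PORT A =====
def reformat_snapshots_to_per_entity_dicts (snapshots : List (List (List (String × Int)))) (id_str : String) (filter : Option (List String)) : List (Int × List (String × List Int)) :=
  let eff := pvEff snapshots id_str filter
  let agent_data : PySem.Dict Int (PySem.Dict String (List Int)) :=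
    (PySem.List.enumerate snapshots).foldl (fun ad is =>
      is.2.foldl (fun ad ag =>
        let a_id := pvAgentGet ag id_str
        if ad.contains a_id then
          let inner := eff.foldl (fun inn p => inn.modify p [] (fun l => l ++ [pvAgentGet ag p])) (ad.getD a_id PySem.Dict.empty)
          ad.insert a_id (inner.modify "iterations" [] (fun l => l ++ [is.1]))
        else
          let inner := eff.foldl (fun inn p => inn.insert p [pvAgentGet ag p]) PySem.Dict.empty
          ad.insert a_id (inner.insert "iterations" [is.1])) ad) PySem.Dict.empty
  agent_data.items.map (fun e => (e.1, e.2.items))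

-- ===== PORT B =====
def reformat_snapshots_to_per_entity_dicts_alt (snapshots : List (List (List (String × Int)))) (id_str : String) (filter : Option (List String)) : List (Int × List (String × List Int)) :=
  let eff : List String :=
    match filter with
    | some f => f
    | none => (((snapshots.headD []).headD []).map Prod.fst).filter (fun k => k ≠ id_str)
  -- pass 1: index.setdefault(agent[id_str], []).append((i, agent))
  let index : PySem.Dict Int (List (Int × List (String × Int))) :=
    (PySem.List.enumerate snapshots).foldl (fun idx is =>
      is.2.foldl (fun idx ag => idx.modify (pvAgentGet ag id_str) [] (fun l => l ++ [(is.1, ag)])) idx) PySem.Dict.empty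
  -- pass 2: shape each entity dict from its appearance list
  let result : PySem.Dict Int (PySem.Dict String (List Int)) :=
    index.items.foldl (fun r e =>
      let entity := (eff.foldl (fun d p => d.insert p (e.2.map (fun ap => pvAgentGet ap.2 p))) PySem.Dict.empty).insert "iterations" (e.2.map Prod.fst)
      r.insert e.1 entity) PySem.Dict.empty
  result.items.map (fun e => (e.1, e.2.items))

-- ===== PRECONDITION & SPEC =====
-- Pre_ excludes (a) inputs on which A raises: filter=None with snapshots[0][0] unavailable (IndexError) or id_str
-- missing from the first agent (ValueError), and any agent missing id_str or a filter property (KeyError); and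
-- (b) two defensible duplicate-key corners on which A still returns: 'iterations' occurring in the effective filter
-- (the entity-dict key collides with the 'iterations' entry) and duplicate entries in filter (A appends twice per
-- iteration where B's dict comprehension deduplicates) — except when no agent id ever repeats, where A and B agree and both corners stay inside Pre_; when filter is None it also requires the first agent's
-- association list to have distinct keys, since a duplicate-key list does not denote a Python dict.
def Pre_reformat_snapshots_to_per_entity_dicts (snapshots : List (List (List (String × Int)))) (id_str : String) (filter : Option (List String)) : Prop :=
  (filter = none → snapshots ≠ [] ∧ snapshots.headD [] ≠ [] ∧ id_str ∈ ((snapshots.headD []).headD []).map Prod.fst ∧ (((snapshots.headD []).headD []).map Prod.fst).Nodup)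
  ∧ (((pvEff snapshots id_str filter).Nodup ∧ "iterations" ∉ pvEff snapshots id_str filter)
     ∨ (snapshots.flatten.map (fun ag => pvAgentGet ag id_str)).Nodup)
  ∧ ∀ snap ∈ snapshots, ∀ ag ∈ snap, id_str ∈ ag.map Prod.fst ∧ ∀ p ∈ pvEff snapshots id_str filter, p ∈ ag.map Prod.fst
instance (snapshots : List (List (List (String × Int)))) (id_str : String) (filter : Option (List String)) : Decidable (Pre_reformat_snapshots_to_per_entity_dicts snapshots id_str filter) := by unfold Pre_reformat_snapshots_to_per_entity_dicts; infer_instance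

def pvWitness_reformat_snapshots_to_per_entity_dicts : (List (List (List (String × Int)))) × String × Option (List String) :=
  ([[[("id", 1), ("x", 5)], [("id", 2), ("x", 7)]], [[("id", 1), ("x", 6)]]], "id", none)

def Spec_reformat_snapshots_to_per_entity_dicts (snapshots : List (List (List (String × Int)))) (id_str : String) (filter : Option (List String)) (out : List (Int × List (String × List Int))) : Prop := out = reformat_snapshots_to_per_entity_dicts_alt snapshots id_str filter
instance (snapshots : List (List (List (String × Int)))) (id_str : String) (filter : Option (List String)) (out : List (Int × List (String × List Int))) : Decidable (Spec_reformat_snapshots_to_per_entity_dicts snapshots id_str filter out) := by unfold Spec_reformat_snapshots_to_per_entity_dicts; infer_instance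

-- ===== CLAIM (what is proved, stated in full; the proofs are below) =====
def Claim_equal_reformat_snapshots_to_per_entity_dicts : Prop := ∀ (snapshots : List (List (List (String × Int)))) (id_str : String) (filter : Option (List String)), Dom_reformat_snapshots_to_per_entity_dicts snapshots id_str filter → Pre_reformat_snapshots_to_per_entity_dicts snapshots id_str filter → Spec_reformat_snapshots_to_per_entity_dicts snapshots id_str filter (reformat_snapshots_to_per_entity_dicts snapshots id_str filter)

-- ===== LEMMAS AND PROOFS =====

def entityD (eff : List String) (apps : List (Int × List (String × Int))) : PySem.Dict String (List Int) :=
  PySem.Dict.mk (eff.map (fun p => (p, apps.map (fun ap => pvAgentGet ap.2 p))) ++ [("iterations", apps.map Prod.fst)])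

def shapeD (eff : List String) (idx : PySem.Dict Int (List (Int × List (String × Int)))) : PySem.Dict Int (PySem.Dict String (List Int)) :=
  PySem.Dict.mk (idx.items.map (fun e => (e.1, entityD eff e.2)))

theorem entity_build (eff : List String) (hnd : eff.Nodup) (hit : "iterations" ∉ eff)
    (v : String → List Int) (w : List Int) :
    (eff.foldl (fun d p => d.insert p (v p)) PySem.Dict.empty).insert "iterations" w
      = PySem.Dict.mk (eff.map (fun p => (p, v p)) ++ [("iterations", w)]) := by
  have hitems : (eff.foldl (fun d p => d.insert p (v p)) PySem.Dict.empty).items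
      = eff.map (fun p => (p, v p)) := by
    have := PySem.Dict.items_foldl_insert_fresh (l := eff) (k := id) (v := v)
      (d := (PySem.Dict.empty : PySem.Dict String (List Int)))
      (by intro a _; simp [PySem.Dict.contains_empty]) (by simpa using hnd)
    simpa using this
  have hcont : (eff.foldl (fun d p => d.insert p (v p)) PySem.Dict.empty).contains "iterations" = false := by
    simp only [PySem.Dict.contains, hitems, List.any_map, List.any_eq_false, Function.comp]
    intro p hp h
    exact hit ((show p = "iterations" by simpa using h) ▸ hp)
  apply PySem.Dict.ext
  rw [PySem.Dict.items_insert_of_not_contains _ _ hcont, hitems]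

theorem modify_fold (ps : List String) (f : String → List Int) (v : String → ℤ) :
    ∀ (pre rest : List (String × List Int)), ps.Nodup →
    (∀ p ∈ ps, p ∉ pre.map Prod.fst) → (∀ p ∈ ps, p ∉ rest.map Prod.fst) →
    ps.foldl (fun inn p => inn.modify p [] (fun l => l ++ [v p]))
        (PySem.Dict.mk (pre ++ ps.map (fun p => (p, f p)) ++ rest))
      = PySem.Dict.mk (pre ++ ps.map (fun p => (p, f p ++ [v p])) ++ rest) := by
  induction ps with
  | nil => intro pre rest _ _ _; simp
  | cons q qs ih =>
    intro pre rest hnd hpre hrest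
    have hq_pre : q ∉ pre.map Prod.fst := hpre q (List.mem_cons_self ..)
    have hq_qs : q ∉ qs := (List.nodup_cons.mp hnd).1
    simp only [List.foldl_cons, List.map_cons]
    have hfind_pre : pre.find? (fun p => p.1 == q) = none := by
      apply List.find?_eq_none.mpr
      intro p hp
      simp only [beq_iff_eq]
      intro h; exact hq_pre (h ▸ List.mem_map_of_mem hp)
    have hget : (PySem.Dict.mk (pre ++ ((q, f q) :: qs.map (fun p => (p, f p))) ++ rest)).getD q [] = f q := by
      simp only [PySem.Dict.getD, PySem.Dict.get?, List.append_assoc,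
        List.find?_append, hfind_pre]
      simp
    have hcont : (PySem.Dict.mk (pre ++ ((q, f q) :: qs.map (fun p => (p, f p))) ++ rest)).contains q = true := by
      simp only [PySem.Dict.contains]
      simp
    have hrep : ∀ (l : List (String × List Int)), (∀ p ∈ l, p.1 ≠ q) →
        l.map (fun p => if (p.1 == q) = true then (q, f q ++ [v q]) else p) = l := by
      intro l h
      rw [List.map_congr_left (g := id) ?_, List.map_id]
      intro p hp; simp [h p hp]
    have hstep : (PySem.Dict.mk (pre ++ ((q, f q) :: qs.map (fun p => (p, f p))) ++ rest)).modify q [] (fun l => l ++ [v q])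
        = PySem.Dict.mk ((pre ++ [(q, f q ++ [v q])]) ++ qs.map (fun p => (p, f p)) ++ rest) := by
      simp only [PySem.Dict.modify, hget]
      apply PySem.Dict.ext
      rw [PySem.Dict.items_insert_of_contains _ _ hcont]
      simp only [PySem.Dict.items, List.map_append, List.map_cons, beq_self_eq_true, if_pos]
      rw [hrep pre (fun p hp h => hq_pre (h ▸ List.mem_map_of_mem hp)),
          hrep (qs.map (fun p => (p, f p))) ?_, hrep rest (fun p hp h => hrest q (List.mem_cons_self ..) (h ▸ List.mem_map_of_mem hp))]
      · simp
      · intro p hp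
        obtain ⟨r, hr, rfl⟩ := List.mem_map.mp hp
        intro h; exact hq_qs (h ▸ hr)
    rw [hstep, ih (pre ++ [(q, f q ++ [v q])]) rest (List.nodup_cons.mp hnd).2
        (by intro p hp
            simp only [List.map_append, List.mem_append]
            rintro (h | h)
            · exact hpre p (List.mem_cons_of_mem _ hp) h
            · simp at h; exact hq_qs (h ▸ hp))
        (fun p hp => hrest p (List.mem_cons_of_mem _ hp))]
    simp

theorem contains_shapeD (eff : List String) (idx : PySem.Dict Int (List (Int × List (String × Int)))) (k : Int) :
    (shapeD eff idx).contains k = idx.contains k := by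
  simp only [shapeD, PySem.Dict.contains, List.any_map]
  rfl

theorem get?_shapeD (eff : List String) (idx : PySem.Dict Int (List (Int × List (String × Int)))) (k : Int) :
    (shapeD eff idx).get? k = (idx.get? k).map (entityD eff) := by
  simp only [shapeD, PySem.Dict.get?, List.find?_map]
  rw [show ((fun p => p.1 == k) ∘ (fun e => (e.1, entityD eff e.2))) = (fun (p : Int × List (Int × List (String × Int))) => p.1 == k) from rfl]
  cases idx.items.find? (fun p => p.1 == k) <;> simp

-- appending one appearance to an entity dict = A's per-agent modify pass
theorem entity_append (eff : List String) (hnd : eff.Nodup) (hit : "iterations" ∉ eff)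
    (apps : List (Int × List (String × Int))) (i : Int) (ag : List (String × Int)) :
    ((eff.foldl (fun inn p => inn.modify p [] (fun l => l ++ [pvAgentGet ag p])) (entityD eff apps)).modify
        "iterations" [] (fun l => l ++ [i]))
      = entityD eff (apps ++ [(i, ag)]) := by
  have h1 := modify_fold eff (fun p => apps.map (fun ap => pvAgentGet ap.2 p)) (fun p => pvAgentGet ag p)
      [] [("iterations", apps.map Prod.fst)] hnd (by simp)
      (by intro p hp; have : p ≠ "iterations" := fun h => hit (h ▸ hp); simpa using this)
  simp only [List.nil_append] at h1
  rw [show entityD eff apps = PySem.Dict.mk (eff.map (fun p => (p, apps.map (fun ap => pvAgentGet ap.2 p))) ++ [("iterations", apps.map Prod.fst)]) from rfl, h1]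
  have hfind : (eff.map (fun p => (p, apps.map (fun ap => pvAgentGet ap.2 p) ++ [pvAgentGet ag p]))).find? (fun p => p.1 == "iterations") = none := by
    apply List.find?_eq_none.mpr
    intro p hp
    obtain ⟨r, hr, rfl⟩ := List.mem_map.mp hp
    have : r ≠ "iterations" := fun h => hit (h ▸ hr)
    simp [this]
  have hget : (PySem.Dict.mk (eff.map (fun p => (p, apps.map (fun ap => pvAgentGet ap.2 p) ++ [pvAgentGet ag p])) ++ [("iterations", apps.map Prod.fst)])).getD "iterations" [] = apps.map Prod.fst := by
    simp only [PySem.Dict.getD, PySem.Dict.get?, List.find?_append, hfind]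
    simp
  have hcont : (PySem.Dict.mk (eff.map (fun p => (p, apps.map (fun ap => pvAgentGet ap.2 p) ++ [pvAgentGet ag p])) ++ [("iterations", apps.map Prod.fst)])).contains "iterations" = true := by
    simp [PySem.Dict.contains]
  simp only [PySem.Dict.modify, hget]
  apply PySem.Dict.ext
  rw [PySem.Dict.items_insert_of_contains _ _ hcont]
  simp only [PySem.Dict.items, List.map_append, List.map_cons]
  rw [List.map_congr_left (g := id) ?_, List.map_id]
  · simp [entityD, List.map_append]
  · intro p hp
    obtain ⟨r, hr, rfl⟩ := List.mem_map.mp hp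
    have : r ≠ "iterations" := fun h => hit (h ▸ hr)
    simp [this]

theorem step_agent (eff : List String) (hnd : eff.Nodup) (hit : "iterations" ∉ eff)
    (id_str : String) (idx : PySem.Dict Int (List (Int × List (String × Int))))
    (hkeys : idx.keys.Nodup) (i : Int) (ag : List (String × Int)) :
    (let a_id := pvAgentGet ag id_str
     if (shapeD eff idx).contains a_id then
       let inner := eff.foldl (fun inn p => inn.modify p [] (fun l => l ++ [pvAgentGet ag p])) ((shapeD eff idx).getD a_id PySem.Dict.empty)
       (shapeD eff idx).insert a_id (inner.modify "iterations" [] (fun l => l ++ [i]))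
     else
       let inner := eff.foldl (fun inn p => inn.insert p [pvAgentGet ag p]) PySem.Dict.empty
       (shapeD eff idx).insert a_id (inner.insert "iterations" [i]))
      = shapeD eff (idx.modify (pvAgentGet ag id_str) [] (fun l => l ++ [(i, ag)])) := by
  set a_id := pvAgentGet ag id_str with ha
  by_cases h : idx.contains a_id = true
  · -- append branch
    obtain ⟨apps, happs⟩ : ∃ apps, idx.get? a_id = some apps := by
      have := PySem.Dict.contains_eq_isSome_get? (d := idx) (k := a_id)
      rw [h] at this
      exact Option.isSome_iff_exists.mp this.symm
    have hgetD : (shapeD eff idx).getD a_id PySem.Dict.empty = entityD eff apps := by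
      simp [PySem.Dict.getD, get?_shapeD, happs]
    simp only [contains_shapeD, h, if_pos, hgetD]
    have hinner := entity_append eff hnd hit apps i ag
    rw [hinner]
    -- both sides: replace the (unique) a_id entry
    have hBmod : idx.modify a_id [] (fun l => l ++ [(i, ag)]) = idx.insert a_id (apps ++ [(i, ag)]) := by
      simp [PySem.Dict.modify, PySem.Dict.getD, happs]
    rw [hBmod]
    apply PySem.Dict.ext
    have hcontS : (shapeD eff idx).contains a_id = true := by rw [contains_shapeD]; exact h
    rw [PySem.Dict.items_insert_of_contains _ _ hcontS]
    simp only [shapeD, PySem.Dict.items]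
    rw [PySem.Dict.items_insert_of_contains _ _ h]
    simp only [List.map_map]
    apply List.map_congr_left
    intro e he
    by_cases he1 : e.1 = a_id
    · have : e = (a_id, apps) := by
        have hmem : (a_id, e.2) ∈ idx.items := by rw [← he1]; simpa using he
        have h2 : idx.get? a_id = some e.2 := PySem.Dict.get?_of_mem_items idx hmem hkeys
        have : e.2 = apps := by rw [h2] at happs; exact (Option.some_inj.mp happs)
        cases e; simp_all
      subst this
      simp [Function.comp]
    · have hb : (e.1 == a_id) = false := by simpa using he1
      simp [Function.comp, hb]
  · -- first-appearance branch
    have h' : idx.contains a_id = false := by simpa using h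
    have hinner := entity_build eff hnd hit (fun p => [pvAgentGet ag p]) [i]
    simp only [contains_shapeD, h', Bool.false_eq_true, if_false, hinner]
    have hBmod : idx.modify a_id [] (fun l => l ++ [(i, ag)]) = idx.insert a_id [(i, ag)] := by
      simp [PySem.Dict.modify, PySem.Dict.getD_of_not_contains _ _ h']
    rw [hBmod]
    apply PySem.Dict.ext
    have hcontS : (shapeD eff idx).contains a_id = false := by rw [contains_shapeD]; exact h'
    rw [PySem.Dict.items_insert_of_not_contains _ _ hcontS]
    simp only [shapeD, PySem.Dict.items]
    rw [PySem.Dict.items_insert_of_not_contains _ _ h']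
    simp [entityD]

theorem inner_nodup (id_str : String) (i : Int) (snap : List (List (String × Int)))
    (idx : PySem.Dict Int (List (Int × List (String × Int)))) (h : idx.keys.Nodup) :
    (snap.foldl (fun idx ag => idx.modify (pvAgentGet ag id_str) [] (fun l => l ++ [(i, ag)])) idx).keys.Nodup :=
  PySem.Dict.nodup_keys_foldl_modify_key snap (fun ag => pvAgentGet ag id_str) []
    (fun _ ag => (fun l => l ++ [(i, ag)])) idx h

theorem inner_fold (eff : List String) (hnd : eff.Nodup) (hit : "iterations" ∉ eff) (id_str : String) :
    ∀ (snap : List (List (String × Int))) (i : Int) (idx : PySem.Dict Int (List (Int × List (String × Int)))),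
    idx.keys.Nodup →
    snap.foldl (fun ad ag =>
        let a_id := pvAgentGet ag id_str
        if ad.contains a_id then
          let inner := eff.foldl (fun inn p => inn.modify p [] (fun l => l ++ [pvAgentGet ag p])) (ad.getD a_id PySem.Dict.empty)
          ad.insert a_id (inner.modify "iterations" [] (fun l => l ++ [i]))
        else
          let inner := eff.foldl (fun inn p => inn.insert p [pvAgentGet ag p]) PySem.Dict.empty
          ad.insert a_id (inner.insert "iterations" [i])) (shapeD eff idx)
      = shapeD eff (snap.foldl (fun idx ag => idx.modify (pvAgentGet ag id_str) [] (fun l => l ++ [(i, ag)])) idx) := by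
  intro snap
  induction snap with
  | nil => intro i idx _; rfl
  | cons ag rest ih =>
    intro i idx h
    simp only [List.foldl_cons]
    rw [step_agent eff hnd hit id_str idx h i ag]
    apply ih
    simp only [PySem.Dict.modify]
    exact PySem.Dict.nodup_keys_insert _ _ _ h

theorem outer_fold (eff : List String) (hnd : eff.Nodup) (hit : "iterations" ∉ eff) (id_str : String) :
    ∀ (snaps : List (List (List (String × Int)))) (s : Int)
      (idx : PySem.Dict Int (List (Int × List (String × Int)))), idx.keys.Nodup →
    (PySem.List.enumerate snaps s).foldl (fun ad is =>
        is.2.foldl (fun ad ag =>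
          let a_id := pvAgentGet ag id_str
          if ad.contains a_id then
            let inner := eff.foldl (fun inn p => inn.modify p [] (fun l => l ++ [pvAgentGet ag p])) (ad.getD a_id PySem.Dict.empty)
            ad.insert a_id (inner.modify "iterations" [] (fun l => l ++ [is.1]))
          else
            let inner := eff.foldl (fun inn p => inn.insert p [pvAgentGet ag p]) PySem.Dict.empty
            ad.insert a_id (inner.insert "iterations" [is.1])) ad) (shapeD eff idx)
      = shapeD eff ((PySem.List.enumerate snaps s).foldl (fun idx is =>
          is.2.foldl (fun idx ag => idx.modify (pvAgentGet ag id_str) [] (fun l => l ++ [(is.1, ag)])) idx) idx)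
      ∧ ((PySem.List.enumerate snaps s).foldl (fun idx is =>
          is.2.foldl (fun idx ag => idx.modify (pvAgentGet ag id_str) [] (fun l => l ++ [(is.1, ag)])) idx) idx).keys.Nodup := by
  intro snaps
  induction snaps with
  | nil => intro s idx h; exact ⟨rfl, h⟩
  | cons snap rest ih =>
    intro s idx h
    simp only [PySem.List.enumerate_cons, List.foldl_cons]
    have h2 := inner_nodup id_str s snap idx h
    constructor
    · rw [inner_fold eff hnd hit id_str snap s idx h]
      exact (ih (s + 1) _ h2).1
    · exact (ih (s + 1) _ h2).2

theorem bodies_eq (snapshots : List (List (List (String × Int)))) (id_str : String)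
    (eff : List String) (hnd : eff.Nodup) (hit : "iterations" ∉ eff) :
    (let agent_data : PySem.Dict Int (PySem.Dict String (List Int)) :=
      (PySem.List.enumerate snapshots).foldl (fun ad is =>
        is.2.foldl (fun ad ag =>
          let a_id := pvAgentGet ag id_str
          if ad.contains a_id then
            let inner := eff.foldl (fun inn p => inn.modify p [] (fun l => l ++ [pvAgentGet ag p])) (ad.getD a_id PySem.Dict.empty)
            ad.insert a_id (inner.modify "iterations" [] (fun l => l ++ [is.1]))
          else
            let inner := eff.foldl (fun inn p => inn.insert p [pvAgentGet ag p]) PySem.Dict.empty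
            ad.insert a_id (inner.insert "iterations" [is.1])) ad) PySem.Dict.empty
     agent_data.items.map (fun e => (e.1, e.2.items)))
    = (let index : PySem.Dict Int (List (Int × List (String × Int))) :=
        (PySem.List.enumerate snapshots).foldl (fun idx is =>
          is.2.foldl (fun idx ag => idx.modify (pvAgentGet ag id_str) [] (fun l => l ++ [(is.1, ag)])) idx) PySem.Dict.empty
       let result : PySem.Dict Int (PySem.Dict String (List Int)) :=
        index.items.foldl (fun r e =>
          let entity := (eff.foldl (fun d p => d.insert p (e.2.map (fun ap => pvAgentGet ap.2 p))) PySem.Dict.empty).insert "iterations" (e.2.map Prod.fst)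
          r.insert e.1 entity) PySem.Dict.empty
       result.items.map (fun e => (e.1, e.2.items))) := by
  have hout := outer_fold eff hnd hit id_str snapshots 0 PySem.Dict.empty (by simp [PySem.Dict.nodup_keys_empty])
  have hstart : shapeD eff PySem.Dict.empty = PySem.Dict.empty := rfl
  rw [hstart] at hout
  obtain ⟨hsh, hnodup⟩ := hout
  simp only
  rw [hsh]
  set idxF := (PySem.List.enumerate snapshots).foldl (fun idx is =>
    is.2.foldl (fun idx ag => idx.modify (pvAgentGet ag id_str) [] (fun l => l ++ [(is.1, ag)])) idx) PySem.Dict.empty with hidx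
  have hres : (idxF.items.foldl (fun r e =>
      r.insert e.1 ((eff.foldl (fun d p => d.insert p (e.2.map (fun ap => pvAgentGet ap.2 p))) PySem.Dict.empty).insert "iterations" (e.2.map Prod.fst))) PySem.Dict.empty).items
      = idxF.items.map (fun e => (e.1, entityD eff e.2)) := by
    have := PySem.Dict.items_foldl_insert_fresh (l := idxF.items) (k := Prod.fst)
      (v := fun e => (eff.foldl (fun d p => d.insert p (e.2.map (fun ap => pvAgentGet ap.2 p))) PySem.Dict.empty).insert "iterations" (e.2.map Prod.fst))
      (d := PySem.Dict.empty) (by intro a _; simp [PySem.Dict.contains_empty]) hnodup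
    rw [this]
    simp only [List.nil_append]
    apply List.map_congr_left
    intro e _
    rw [entity_build eff hnd hit _ _]
    rfl
  rw [hres]
  simp only [shapeD, List.map_map]

-- ===== the no-repeat branch: when no agent id ever appears twice, A = B for ANY filter =====

def entityE (eff : List String) (i : Int) (ag : List (String × Int)) : PySem.Dict String (List Int) :=
  (eff.foldl (fun inn p => inn.insert p [pvAgentGet ag p]) PySem.Dict.empty).insert "iterations" [i]

theorem nestedA (eff : List String) (id_str : String) :
    ∀ (l : List (List (List (String × Int)))) (s : Int) (init : PySem.Dict Int (PySem.Dict String (List Int))),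
    (PySem.List.enumerate l s).foldl (fun ad is =>
        is.2.foldl (fun ad ag =>
          let a_id := pvAgentGet ag id_str
          if ad.contains a_id then
            let inner := eff.foldl (fun inn p => inn.modify p [] (fun l => l ++ [pvAgentGet ag p])) (ad.getD a_id PySem.Dict.empty)
            ad.insert a_id (inner.modify "iterations" [] (fun l => l ++ [is.1]))
          else
            let inner := eff.foldl (fun inn p => inn.insert p [pvAgentGet ag p]) PySem.Dict.empty
            ad.insert a_id (inner.insert "iterations" [is.1])) ad) init
      = ((PySem.List.enumerate l s).flatMap (fun is => is.2.map (fun ag => (is.1, ag)))).foldl (fun ad x =>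
          let a_id := pvAgentGet x.2 id_str
          if ad.contains a_id then
            let inner := eff.foldl (fun inn p => inn.modify p [] (fun l => l ++ [pvAgentGet x.2 p])) (ad.getD a_id PySem.Dict.empty)
            ad.insert a_id (inner.modify "iterations" [] (fun l => l ++ [x.1]))
          else
            let inner := eff.foldl (fun inn p => inn.insert p [pvAgentGet x.2 p]) PySem.Dict.empty
            ad.insert a_id (inner.insert "iterations" [x.1])) init := by
  intro l
  induction l with
  | nil => intro s init; rfl
  | cons a l ih =>
    intro s init
    simp only [PySem.List.enumerate_cons, List.foldl_cons, List.flatMap_cons, List.foldl_append,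
      List.foldl_map]
    exact ih (s + 1) _

theorem nestedB (id_str : String) :
    ∀ (l : List (List (List (String × Int)))) (s : Int) (init : PySem.Dict Int (List (Int × List (String × Int)))),
    (PySem.List.enumerate l s).foldl (fun idx is =>
        is.2.foldl (fun idx ag => idx.modify (pvAgentGet ag id_str) [] (fun l => l ++ [(is.1, ag)])) idx) init
      = ((PySem.List.enumerate l s).flatMap (fun is => is.2.map (fun ag => (is.1, ag)))).foldl (fun idx x =>
          idx.modify (pvAgentGet x.2 id_str) [] (fun l => l ++ [(x.1, x.2)])) init := by
  intro l
  induction l with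
  | nil => intro s init; rfl
  | cons a l ih =>
    intro s init
    simp only [PySem.List.enumerate_cons, List.foldl_cons, List.flatMap_cons, List.foldl_append,
      List.foldl_map]
    exact ih (s + 1) _

theorem flat_ids (id_str : String) :
    ∀ (l : List (List (List (String × Int)))) (s : Int),
    ((PySem.List.enumerate l s).flatMap (fun is => is.2.map (fun ag => (is.1, ag)))).map
        (fun x => pvAgentGet x.2 id_str)
      = l.flatten.map (fun ag => pvAgentGet ag id_str) := by
  intro l
  induction l with
  | nil => intro s; rfl
  | cons a l ih =>
    intro s
    simp only [PySem.List.enumerate_cons, List.flatMap_cons, List.flatten_cons, List.map_append,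
      List.map_map, ih (s + 1)]
    rfl

theorem foldA_norep (eff : List String) (id_str : String) :
    ∀ (L : List (Int × List (String × Int))) (d : PySem.Dict Int (PySem.Dict String (List Int))),
    (∀ x ∈ L, d.contains (pvAgentGet x.2 id_str) = false) →
    (L.map (fun x => pvAgentGet x.2 id_str)).Nodup →
    L.foldl (fun ad x =>
        let a_id := pvAgentGet x.2 id_str
        if ad.contains a_id then
          let inner := eff.foldl (fun inn p => inn.modify p [] (fun l => l ++ [pvAgentGet x.2 p])) (ad.getD a_id PySem.Dict.empty)
          ad.insert a_id (inner.modify "iterations" [] (fun l => l ++ [x.1]))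
        else
          let inner := eff.foldl (fun inn p => inn.insert p [pvAgentGet x.2 p]) PySem.Dict.empty
          ad.insert a_id (inner.insert "iterations" [x.1])) d
      = PySem.Dict.mk (d.items ++ L.map (fun x => (pvAgentGet x.2 id_str, entityE eff x.1 x.2))) := by
  intro L
  induction L with
  | nil => intro d _ _; simp
  | cons x xs ih =>
    intro d hfresh hnd
    have hx := hfresh x (List.mem_cons_self ..)
    simp only [List.foldl_cons, hx, Bool.false_eq_true, if_false]
    have hins : d.insert (pvAgentGet x.2 id_str) (entityE eff x.1 x.2)
        = PySem.Dict.mk (d.items ++ [(pvAgentGet x.2 id_str, entityE eff x.1 x.2)]) := by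
      apply PySem.Dict.ext
      rw [PySem.Dict.items_insert_of_not_contains _ _ hx]
    rw [show ((eff.foldl (fun inn p => inn.insert p [pvAgentGet x.2 p]) PySem.Dict.empty).insert "iterations" [x.1]) = entityE eff x.1 x.2 from rfl, hins,
      ih _ ?_ (List.nodup_cons.mp hnd).2]
    · simp
    · intro y hy
      simp only [PySem.Dict.contains, List.any_append, Bool.or_eq_false_iff]
      refine ⟨hfresh y (List.mem_cons_of_mem _ hy), ?_⟩
      have : pvAgentGet x.2 id_str ≠ pvAgentGet y.2 id_str := by
        intro h
        have hm : pvAgentGet y.2 id_str ∈ xs.map (fun x => pvAgentGet x.2 id_str) :=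
          List.mem_map_of_mem hy
        exact (List.nodup_cons.mp hnd).1 (by simpa [h] using hm)
      simpa using this
theorem foldB_norep (id_str : String) :
    ∀ (L : List (Int × List (String × Int))) (d : PySem.Dict Int (List (Int × List (String × Int)))),
    (∀ x ∈ L, d.contains (pvAgentGet x.2 id_str) = false) →
    (L.map (fun x => pvAgentGet x.2 id_str)).Nodup →
    L.foldl (fun idx x => idx.modify (pvAgentGet x.2 id_str) [] (fun l => l ++ [(x.1, x.2)])) d
      = PySem.Dict.mk (d.items ++ L.map (fun x => (pvAgentGet x.2 id_str, [x]))) := by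
  intro L
  induction L with
  | nil => intro d _ _; simp
  | cons x xs ih =>
    intro d hfresh hnd
    have hx := hfresh x (List.mem_cons_self ..)
    have hstep : d.modify (pvAgentGet x.2 id_str) [] (fun l => l ++ [(x.1, x.2)])
        = PySem.Dict.mk (d.items ++ [(pvAgentGet x.2 id_str, [x])]) := by
      simp only [PySem.Dict.modify, PySem.Dict.getD_of_not_contains _ _ hx, List.nil_append]
      apply PySem.Dict.ext
      rw [PySem.Dict.items_insert_of_not_contains _ _ hx]
    simp only [List.foldl_cons]
    rw [hstep, ih _ ?_ (List.nodup_cons.mp hnd).2]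
    · simp
    · intro y hy
      simp only [PySem.Dict.contains, List.any_append, Bool.or_eq_false_iff]
      refine ⟨hfresh y (List.mem_cons_of_mem _ hy), ?_⟩
      have : pvAgentGet x.2 id_str ≠ pvAgentGet y.2 id_str := by
        intro h
        have hm : pvAgentGet y.2 id_str ∈ xs.map (fun x => pvAgentGet x.2 id_str) :=
          List.mem_map_of_mem hy
        exact (List.nodup_cons.mp hnd).1 (by simpa [h] using hm)
      simpa using this

theorem bodies_eq_norep (snapshots : List (List (List (String × Int)))) (id_str : String)
    (eff : List String)
    (hnr : (snapshots.flatten.map (fun ag => pvAgentGet ag id_str)).Nodup) :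
    (let agent_data : PySem.Dict Int (PySem.Dict String (List Int)) :=
      (PySem.List.enumerate snapshots).foldl (fun ad is =>
        is.2.foldl (fun ad ag =>
          let a_id := pvAgentGet ag id_str
          if ad.contains a_id then
            let inner := eff.foldl (fun inn p => inn.modify p [] (fun l => l ++ [pvAgentGet ag p])) (ad.getD a_id PySem.Dict.empty)
            ad.insert a_id (inner.modify "iterations" [] (fun l => l ++ [is.1]))
          else
            let inner := eff.foldl (fun inn p => inn.insert p [pvAgentGet ag p]) PySem.Dict.empty
            ad.insert a_id (inner.insert "iterations" [is.1])) ad) PySem.Dict.empty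
     agent_data.items.map (fun e => (e.1, e.2.items)))
    = (let index : PySem.Dict Int (List (Int × List (String × Int))) :=
        (PySem.List.enumerate snapshots).foldl (fun idx is =>
          is.2.foldl (fun idx ag => idx.modify (pvAgentGet ag id_str) [] (fun l => l ++ [(is.1, ag)])) idx) PySem.Dict.empty
       let result : PySem.Dict Int (PySem.Dict String (List Int)) :=
        index.items.foldl (fun r e =>
          let entity := (eff.foldl (fun d p => d.insert p (e.2.map (fun ap => pvAgentGet ap.2 p))) PySem.Dict.empty).insert "iterations" (e.2.map Prod.fst)
          r.insert e.1 entity) PySem.Dict.empty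
       result.items.map (fun e => (e.1, e.2.items))) := by
  have hflat : (((PySem.List.enumerate snapshots).flatMap (fun is => is.2.map (fun ag => (is.1, ag)))).map (fun x => pvAgentGet x.2 id_str)).Nodup := by
    rw [flat_ids id_str snapshots 0]; exact hnr
  simp only
  rw [nestedA eff id_str snapshots 0 PySem.Dict.empty, nestedB id_str snapshots 0 PySem.Dict.empty]
  rw [foldA_norep eff id_str _ PySem.Dict.empty (by intro x _; simp [PySem.Dict.contains_empty]) hflat,
      foldB_norep id_str _ PySem.Dict.empty (by intro x _; simp [PySem.Dict.contains_empty]) hflat]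
  set L := (PySem.List.enumerate snapshots).flatMap (fun is => is.2.map (fun ag => (is.1, ag))) with hL
  have hkeysB : ((PySem.Dict.mk (PySem.Dict.empty.items ++ L.map (fun x => (pvAgentGet x.2 id_str, [x])))).items.map Prod.fst).Nodup := by
    simpa [List.map_map, Function.comp_def] using hflat
  have hres := PySem.Dict.items_foldl_insert_fresh
      (l := (PySem.Dict.mk (PySem.Dict.empty.items ++ L.map (fun x => (pvAgentGet x.2 id_str, [x])))).items)
      (k := Prod.fst)
      (v := fun e => (eff.foldl (fun d p => d.insert p (e.2.map (fun ap => pvAgentGet ap.2 p))) PySem.Dict.empty).insert "iterations" (e.2.map Prod.fst))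
      (d := PySem.Dict.empty) (by intro a _; simp [PySem.Dict.contains_empty]) hkeysB
  rw [show ∀ (d : PySem.Dict Int (PySem.Dict String (List Int))), d.items = d.1 from fun _ => rfl] at *
  rw [hres]
  simp only [show ∀ (κ ν : Type) (_ : BEq κ), (PySem.Dict.empty : PySem.Dict κ ν).items = [] from fun _ _ _ => rfl,
    List.nil_append, List.map_map]
  apply List.map_congr_left
  intro x _
  rfl

-- ===== VERDICT (by name: the statement is the Claim_ definition above) =====
theorem reformat_snapshots_to_per_entity_dicts_spec : Claim_equal_reformat_snapshots_to_per_entity_dicts := by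
  intro snapshots id_str filter hdom hpre
  obtain ⟨h0, hd, _⟩ := hpre
  unfold Spec_reformat_snapshots_to_per_entity_dicts
  unfold reformat_snapshots_to_per_entity_dicts reformat_snapshots_to_per_entity_dicts_alt
  cases filter with
  | some f =>
    rcases hd with ⟨hnd, hit⟩ | hnr
    · exact bodies_eq snapshots id_str f hnd hit
    · exact bodies_eq_norep snapshots id_str f hnr
  | none =>
    have hk := (h0 rfl).2.2.2
    have heq : (((snapshots.headD []).headD []).map Prod.fst).filter (fun k => k ≠ id_str)
        = pvEff snapshots id_str none := by
      rw [pvEff, List.Nodup.erase_eq_filter hk]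
      apply List.filter_congr
      intro x _
      simp [bne, beq_eq_decide]
    simp only [heq]
    rcases hd with ⟨hnd, hit⟩ | hnr
    · exact bodies_eq snapshots id_str (pvEff snapshots id_str none) hnd hit
    · exact bodies_eq_norep snapshots id_str (pvEff snapshots id_str none) hnr
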